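-- pv_equiv track=rewrite | github.com/Telyonok/5thSemester | СиМЗИИС/Lab2/lab2.py | findDividerCombinations
-- ===== SOURCE A (Python) =====
-- def findDividerCombinations(number):
--     dividerCombinations = []
--     for i in range(1, number + 1):
--         if number % i == 0:
--             for j in range(1, number + 1):
--                 if number % (i * j) == 0:
--                     dividerCombinations.append((i, j))
--     return dividerCombinations
-- ===== SOURCE B (Python) =====
-- def findDividerCombinations(number):
--     divs = [d for d in range(1, number + 1) if number % d == 0]
--     return [(i, j) for i in divs for j in divs if (number // i) % j == 0]
-- ===== Notes on version B (the rewrite author's own statement) =====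
-- stated objective: faster
-- what changed: B collects the divisors of n in one linear pass and then pairs each divisor i with the divisors j of n//i found by scanning only the divisor list, removing A's inner scan over the whole range 1..n for every divisor.
import Mathlib
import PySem

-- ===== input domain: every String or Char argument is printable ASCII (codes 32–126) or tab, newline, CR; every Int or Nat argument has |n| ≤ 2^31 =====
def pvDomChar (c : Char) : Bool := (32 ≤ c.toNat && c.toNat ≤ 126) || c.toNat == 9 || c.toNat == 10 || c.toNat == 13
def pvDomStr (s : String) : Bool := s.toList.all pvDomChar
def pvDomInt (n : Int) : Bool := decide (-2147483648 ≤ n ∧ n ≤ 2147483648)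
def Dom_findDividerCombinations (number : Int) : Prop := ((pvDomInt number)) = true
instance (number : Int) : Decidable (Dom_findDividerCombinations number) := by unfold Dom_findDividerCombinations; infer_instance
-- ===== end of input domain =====

-- B collects the divisors of n once and pairs each divisor i with the divisors j of n//i
-- found by scanning only that divisor list, instead of A's inner scan over all of 1..n (faster).

-- ===== PORT A =====
def findDividerCombinations (number : Int) : List (Int × Int) :=
  (PySem.List.pyRange 1 (number + 1) 1).foldl (fun acc i =>
    if PySem.Int.mod number i == 0 then
      (PySem.List.pyRange 1 (number + 1) 1).foldl (fun acc2 j =>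
        if PySem.Int.mod number (i * j) == 0 then acc2 ++ [(i, j)] else acc2) acc
    else acc) []

-- ===== PORT B =====
def findDividerCombinations_alt (number : Int) : List (Int × Int) :=
  let divs := (PySem.List.pyRange 1 (number + 1) 1).filter
    (fun d => PySem.Int.mod number d == 0)
  divs.flatMap (fun i =>
    (divs.filter (fun j => PySem.Int.mod (PySem.Int.floordiv number i) j == 0)).map
      (fun j => (i, j)))

-- ===== PRECONDITION & SPEC =====
def Spec_findDividerCombinations (number : Int) (out : List (Int × Int)) : Prop := out = findDividerCombinations_alt number
instance (number : Int) (out : List (Int × Int)) : Decidable (Spec_findDividerCombinations number out) := by unfold Spec_findDividerCombinations; infer_instance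

-- ===== CLAIM (what is proved, stated in full; the proofs are below) =====
def Claim_equal_findDividerCombinations : Prop := ∀ (number : Int), Dom_findDividerCombinations number → Spec_findDividerCombinations number (findDividerCombinations number)

-- ===== LEMMAS AND PROOFS =====

/-- Core arithmetic fact: for 1 ≤ i dividing n and 1 ≤ j, Python's `n % (i*j) == 0`
is `(n // i) % j == 0 and n % j == 0`. -/
lemma core_divisibility (n i j : Int) (hi1 : 1 ≤ i) (_hj1 : 1 ≤ j) (hdvd : i ∣ n) :
    (PySem.Int.mod n (i * j) == 0)
      = (PySem.Int.mod (PySem.Int.floordiv n i) j == 0 && PySem.Int.mod n j == 0) := by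
  rw [PySem.Int.floordiv_eq_ediv_of_pos (by omega : (0:Int) < i), Bool.eq_iff_iff]
  simp only [beq_iff_eq, Bool.and_eq_true, PySem.Int.mod_eq_zero_iff_dvd]
  constructor
  · intro h
    have hj : j ∣ n / i := (Int.dvd_div_iff_mul_dvd hdvd).mpr h
    exact ⟨hj, hj.trans (Int.ediv_dvd_of_dvd hdvd)⟩
  · rintro ⟨h, -⟩
    exact (Int.dvd_div_iff_mul_dvd hdvd).mp h

/-- A's outer loop: conditional extension of the accumulator is a flatMap over the filtered list. -/
lemma foldl_if_append_eq_flatMap {a b : Type} (l : List a) (q : a -> Bool) (G : a -> List b) :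
    forall acc, l.foldl (fun acc x => if q x then acc ++ G x else acc) acc
      = acc ++ (l.filter q).flatMap G := by
  induction l with
  | nil => intro acc; simp
  | cons x xs ih =>
    intro acc
    by_cases h : q x <;> simp [h, ih]

-- ===== VERDICT (by name: the statement is the Claim_ definition above) =====
theorem findDividerCombinations_spec : Claim_equal_findDividerCombinations := by
  intro n _
  unfold Spec_findDividerCombinations findDividerCombinations findDividerCombinations_alt
  show List.foldl _ [] (PySem.List.pyRange 1 (n + 1) 1) = _
  calc
    (PySem.List.pyRange 1 (n + 1) 1).foldl (fun acc i =>
        if PySem.Int.mod n i == 0 then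
          (PySem.List.pyRange 1 (n + 1) 1).foldl (fun acc2 j =>
            if PySem.Int.mod n (i * j) == 0 then acc2 ++ [(i, j)] else acc2) acc
        else acc) []
      = (PySem.List.pyRange 1 (n + 1) 1).foldl (fun acc i =>
          if PySem.Int.mod n i == 0 then
            acc ++ ((PySem.List.pyRange 1 (n + 1) 1).filter
              (fun j => PySem.Int.mod n (i * j) == 0)).map (fun j => (i, j))
          else acc) [] := by
        refine PySem.List.foldl_congr_mem _ _ _ _ ?_
        intro acc i _
        by_cases h : PySem.Int.mod n i == 0
        · simp only [h, if_true]
          exact PySem.List.foldl_append_if _ _ _ _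
        · simp [h]
    _ = [] ++ (PySem.List.pyRange 1 (n + 1) 1).foldl (fun acc i =>
          if PySem.Int.mod n i == 0 then
            acc ++ ((PySem.List.pyRange 1 (n + 1) 1).filter
              (fun j => PySem.Int.mod n (i * j) == 0)).map (fun j => (i, j))
          else acc) [] := by rw [List.nil_append]
    _ = _ := by
        rw [foldl_if_append_eq_flatMap]
        rw [List.nil_append]
        show _ = List.flatMap _ (List.filter _ _)
        refine List.flatMap_congr ?_
        intro i hiF
        have hiR : i ∈ PySem.List.pyRange 1 (n + 1) 1 := List.mem_of_mem_filter hiF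
        have hq : (PySem.Int.mod n i == 0) = true := (List.mem_filter.mp hiF).2
        congr 1
        rw [List.filter_filter]
        refine List.filter_congr ?_
        intro j hjR
        have hi := (PySem.List.mem_pyRange_one.mp hiR).1
        have hj := (PySem.List.mem_pyRange_one.mp hjR).1
        have hdvd : i ∣ n := PySem.Int.mod_eq_zero_iff_dvd n i |>.mp (by simpa using hq)
        exact core_divisibility n i j hi hj hdvd
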